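-- pv_equiv track=rewrite | github.com/thistleknot/arxiv_rag | three_layer_gist_retriever.py | de_overlap_strings
-- ===== SOURCE A (Python) =====
-- from typing import List, Dict, Tuple, Optional, Set
--
-- def de_overlap_strings(strings: List[str]) -> List[str]:
--     """
--     Remove overlapping suffixes from consecutive strings.
--
--     When chunks are created with overlap, this function removes the duplicate
--     content by detecting where the end of one string matches the beginning of the next.
--
--     Args:
--         strings: List of text chunks (ordered)
--
--     Returns:
--         List of de-overlapped chunks
--     """
--     if len(strings) <= 1:
--         return strings
--
--     def find_overlap(s1: str, s2: str) -> str: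
--         """Find the longest suffix of s1 that matches a prefix of s2."""
--         max_len = min(len(s1), len(s2))
--         for i in range(max_len, 0, -1):
--             if s1[-i:] == s2[:i]:
--                 return s1[-i:]
--         return ""
--
--     result = []
--     for i in range(len(strings) - 1):
--         s1, s2 = strings[i], strings[i + 1]
--         overlap = find_overlap(s1, s2)
--         if overlap:
--             s1 = s1[:-len(overlap)]
--         result.append(s1)
--
--     # Add the last string as is
--     result.append(strings[-1])
--     return result
-- ===== SOURCE B (Python) =====
-- from typing import List
--
-- def _overlap_len(s1: str, s2: str) -> int:
--     """Length of the longest suffix of s1 that is a prefix of s2.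
--
--     Instead of re-comparing a full slice pair for every candidate length,
--     jump with str.find to the positions in s1 holding s2's first character
--     (only those can start a match) and test each with one startswith call.
--     """
--     if not s2:
--         return 0
--     c = s2[0]
--     p = s1.find(c, max(0, len(s1) - len(s2)))
--     while p != -1:
--         if s2.startswith(s1[p:]):
--             return len(s1) - p
--         p = s1.find(c, p + 1)
--     return 0
--
-- def de_overlap_strings(strings: List[str]) -> List[str]:
--     return [s1[:len(s1) - _overlap_len(s1, s2)]
--             for s1, s2 in zip(strings, strings[1:])] + strings[-1:]
-- ===== Notes on version B (the rewrite author's own statement) =====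
-- stated objective: alternative
-- what changed: A tries every overlap length descending and compares two freshly built slices per length; B scans s1 ascending over the positions holding s2's first character (the only possible match starts, located with str.find) and tests each candidate suffix with one startswith, pairing consecutive strings via zip instead of index arithmetic.
import Mathlib
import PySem

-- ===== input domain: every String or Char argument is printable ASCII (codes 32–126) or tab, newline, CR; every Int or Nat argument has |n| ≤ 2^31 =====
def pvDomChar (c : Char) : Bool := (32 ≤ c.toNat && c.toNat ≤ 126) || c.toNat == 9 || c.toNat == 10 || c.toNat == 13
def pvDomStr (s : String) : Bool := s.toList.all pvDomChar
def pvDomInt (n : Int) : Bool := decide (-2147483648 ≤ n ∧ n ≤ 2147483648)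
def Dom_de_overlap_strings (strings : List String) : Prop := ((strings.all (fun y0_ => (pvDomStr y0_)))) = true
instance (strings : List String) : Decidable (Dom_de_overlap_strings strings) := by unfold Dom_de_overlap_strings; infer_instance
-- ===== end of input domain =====

-- B replaces A's descending try-every-overlap-length slice comparison by an ascending scan of
-- s1 over the positions holding s2's first character, testing each candidate suffix once;
-- string slicing is ported on the List Char side (exact on code points).

-- ===== PORT A =====
-- find_overlap's 'for i in range(max_len, 0, -1): if s1[-i:] == s2[:i]: return s1[-i:]'
def pvGoA (l1 l2 : List Char) : List Int → List Char
  | [] => []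
  | i :: rest =>
    if PySem.List.slice l1 (some (-i)) none = PySem.List.slice l2 none (some i) then
      PySem.List.slice l1 (some (-i)) none
    else pvGoA l1 l2 rest

def pvFindOverlap (l1 l2 : List Char) : List Char :=
  pvGoA l1 l2 (PySem.List.pyRange (min (l1.length : Int) (l2.length : Int)) 0 (-1))

def de_overlap_strings (strings : List String) : List String :=
  if strings.length ≤ 1 then strings
  else
    let n : Int := strings.length
    let res := (PySem.List.pyRange 0 (n - 1) 1).foldl (fun acc i =>
      let s1 := (PySem.List.pyGetD strings i "").toList
      let s2 := (PySem.List.pyGetD strings (i + 1) "").toList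
      let ov := pvFindOverlap s1 s2
      let s1' := if ov ≠ [] then PySem.List.slice s1 none (some (-(ov.length : Int))) else s1
      acc ++ [String.ofList s1']) []
    res ++ [PySem.List.pyGetD strings (-1) ""]

-- ===== PORT B =====
-- 'p = s1.find(c, start); while p != -1: if s2.startswith(s1[p:]): return len(s1)-p; p = s1.find(c, p+1)'
-- ported exactly as a left-to-right scan of the suffix s1[start:]: str.find(c, p) is the
-- char-by-char advance to the next position holding c, so the scan visits exactly the
-- candidate positions the Python visits, in the same order, testing the same condition.
def pvScanB (l2 : List Char) (c : Char) : List Char → Nat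
  | [] => 0
  | x :: xs => if x = c ∧ (x :: xs).isPrefixOf l2 then (x :: xs).length else pvScanB l2 c xs

def pvOverlapLen (l1 l2 : List Char) : Nat :=
  match l2 with
  | [] => 0
  | c :: _ => pvScanB l2 c (l1.drop (l1.length - l2.length))

def de_overlap_strings_alt (strings : List String) : List String :=
  (List.zipWith (fun s1 s2 =>
      let l1 := s1.toList
      String.ofList (l1.take (l1.length - pvOverlapLen l1 s2.toList))) strings strings.tail)
    ++ PySem.List.slice strings (some (-1)) none

-- ===== PRECONDITION & SPEC =====
def Spec_de_overlap_strings (strings : List String) (out : List String) : Prop := out = de_overlap_strings_alt strings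
instance (strings : List String) (out : List String) : Decidable (Spec_de_overlap_strings strings out) := by unfold Spec_de_overlap_strings; infer_instance

-- ===== CLAIM (what is proved, stated in full; the proofs are below) =====
def Claim_equal_de_overlap_strings : Prop := ∀ (strings : List String), Dom_de_overlap_strings strings → Spec_de_overlap_strings strings (de_overlap_strings strings)

-- ===== LEMMAS AND PROOFS =====

-- reference: the largest i ≤ n with s2[:i] == s1[-i:], found by descending search (A's order)
def pvRefOv (l1 l2 : List Char) : Nat → Nat
  | 0 => 0
  | i + 1 => if l2.take (i + 1) = l1.drop (l1.length - (i + 1)) then i + 1 else pvRefOv l1 l2 i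

theorem pvRefOv_le (l1 l2 : List Char) (n : Nat) : pvRefOv l1 l2 n ≤ n := by
  induction n with
  | zero => simp [pvRefOv]
  | succ i ih => simp only [pvRefOv]; split <;> omega

-- A's descending loop returns the reference overlap, as a suffix of l1
theorem pvGoA_eq_ref (l1 l2 : List Char) (n : Nat) :
    pvGoA l1 l2 (PySem.List.pyRange (n : Int) 0 (-1)) = l1.drop (l1.length - pvRefOv l1 l2 n) := by
  induction n with
  | zero =>
    rw [PySem.List.pyRange_neg_one_eq_nil (by norm_num)]
    simp [pvGoA, pvRefOv]
  | succ i ih =>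
    rw [PySem.List.pyRange_neg_one_cons (by positivity)]
    have h1 : PySem.List.slice l1 (some (-((i+1 : Nat) : Int))) none = l1.drop (l1.length - (i+1)) :=
      PySem.List.slice_from_neg_natCast l1 (i+1) (by omega)
    have h2 : PySem.List.slice l2 none (some ((i+1 : Nat) : Int)) = l2.take (i+1) :=
      PySem.List.slice_to_natCast l2 (i+1)
    have hr : ((i+1 : Nat) : Int) - 1 = ((i : Nat) : Int) := by push_cast; ring
    simp only [pvGoA, h1, h2, hr, pvRefOv]
    by_cases h : l2.take (i+1) = l1.drop (l1.length - (i+1))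
    · rw [if_pos h.symm, if_pos h]
    · rw [if_neg (fun hh => h hh.symm), if_neg h, ih]

-- B's scan over a suffix of l1 returns the reference overlap length
theorem pvScanB_eq_ref (l1 t : List Char) (c : Char) :
    ∀ rest, rest <:+ l1 → rest.length ≤ (c :: t).length →
      pvScanB (c :: t) c rest = pvRefOv l1 (c :: t) rest.length := by
  intro rest
  induction rest with
  | nil => intro _ _; simp [pvScanB, pvRefOv]
  | cons x xs ih =>
    intro hsuf hlen
    have hx : l1.drop (l1.length - (xs.length + 1)) = x :: xs := by
      have := List.suffix_iff_eq_drop.mp hsuf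
      simpa using this.symm
    have hcond : (x = c ∧ (x :: xs).isPrefixOf (c :: t)) ↔
        ((c :: t).take (xs.length + 1) = x :: xs) := by
      constructor
      · rintro ⟨hxc, hpre⟩
        have hp : (x :: xs) <+: (c :: t) := by
          simpa [List.isPrefixOf_iff_prefix] using hpre
        have := List.prefix_iff_eq_take.mp hp
        simpa using this.symm
      · intro h
        have hp : (x :: xs) <+: (c :: t) := by
          rw [← h]; exact List.take_prefix _ _
        constructor
        · have hcons : (c :: t).take (xs.length + 1) = c :: t.take xs.length := by simp
          rw [hcons] at h; exact (List.cons.injEq _ _ _ _ ▸ h).1.symm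
        · simpa [List.isPrefixOf_iff_prefix] using hp
    simp only [pvScanB, List.length_cons, pvRefOv, hx]
    by_cases h : x = c ∧ (x :: xs).isPrefixOf (c :: t)
    · rw [if_pos h, if_pos (hcond.mp h)]
    · rw [if_neg h, if_neg (fun hh => h (hcond.mpr hh)),
        ih (List.IsSuffix.trans (List.suffix_cons x xs) hsuf) (by simp at hlen ⊢; omega)]

theorem pvOverlapLen_eq_ref (l1 l2 : List Char) :
    pvOverlapLen l1 l2 = pvRefOv l1 l2 (min l1.length l2.length) := by
  match l2 with
  | [] => simp [pvOverlapLen, pvRefOv]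
  | c :: t =>
    have hlen : (l1.drop (l1.length - (c :: t).length)).length = min l1.length (c :: t).length := by
      simp; omega
    rw [pvOverlapLen, pvScanB_eq_ref l1 t c _ (List.drop_suffix _ _) (by rw [hlen]; omega), hlen]

-- A's per-pair trimmed string equals B's per-pair trimmed string
theorem pvPair_eq (l1 l2 : List Char) :
    (if pvFindOverlap l1 l2 ≠ [] then
        PySem.List.slice l1 none (some (-(((pvFindOverlap l1 l2).length : Nat) : Int)))
      else l1)
      = l1.take (l1.length - pvOverlapLen l1 l2) := by
  have hcast : (min (l1.length : Int) (l2.length : Int)) = ((min l1.length l2.length : Nat) : Int) := by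
    push_cast; rfl
  have hov : pvFindOverlap l1 l2
      = l1.drop (l1.length - pvRefOv l1 l2 (min l1.length l2.length)) := by
    rw [pvFindOverlap, hcast, pvGoA_eq_ref]
  have hkle : pvRefOv l1 l2 (min l1.length l2.length) ≤ l1.length :=
    le_trans (pvRefOv_le _ _ _) (by omega)
  rw [pvOverlapLen_eq_ref]
  by_cases h0 : pvRefOv l1 l2 (min l1.length l2.length) = 0
  · have he : pvFindOverlap l1 l2 = [] := by
      rw [hov, h0]; simp [List.drop_length]
    rw [if_neg (by simpa using he), h0]
    simp
  · have hne : pvFindOverlap l1 l2 ≠ [] := by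
      rw [hov]
      simp only [ne_eq, List.drop_eq_nil_iff]
      omega
    have hlen : (pvFindOverlap l1 l2).length = pvRefOv l1 l2 (min l1.length l2.length) := by
      rw [hov]; simp; omega
    rw [if_pos hne, hlen, PySem.List.slice_to_neg_natCast l1 _ (by omega)]

theorem drop_len_sub_one {α : Type} (l : List α) (h : l ≠ []) : l.drop (l.length - 1) = [l.getLast h] := by
  induction l with
  | nil => simp at h
  | cons x xs ih =>
    cases xs with
    | nil => simp
    | cons y ys =>
      have := ih (by simp)
      simpa [List.getLast, Nat.succ_sub_one] using this

-- ===== VERDICT (by name: the statement is the Claim_ definition above) =====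
theorem de_overlap_strings_spec : Claim_equal_de_overlap_strings := by
  intro strings _
  unfold Spec_de_overlap_strings de_overlap_strings de_overlap_strings_alt
  by_cases hle : strings.length ≤ 1
  · rw [if_pos hle]
    match strings, hle with
    | [], _ => simp [PySem.List.slice_from_neg_one]
    | [s], _ => simp [PySem.List.slice_from_neg_one]
  · rw [if_neg hle]
    have hlen2 : 2 ≤ strings.length := by omega
    have hne : strings ≠ [] := by
      intro h; rw [h] at hlen2; simp at hlen2
    simp only [PySem.List.foldl_append_singleton_eq_map, List.nil_append]
    congr 1
    · rw [PySem.List.pyRange_one]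
      have hnt : ((strings.length : Int) - 1 - 0).toNat = strings.length - 1 := by omega
      rw [hnt]
      apply List.ext_getElem
      · simp
      · intro j hj1 hj2
        simp only [List.getElem_map, List.getElem_range, List.getElem_zipWith]
        have hj : j < strings.length - 1 := by simpa using hj1
        have hgj : PySem.List.pyGetD strings (0 + (j : Int)) "" = strings[j] := by
          rw [zero_add, PySem.List.pyGetD_natCast, List.getD_eq_getElem _ _ (by omega)]
        have hgj1 : PySem.List.pyGetD strings ((0 + (j : Int)) + 1) "" = strings[j + 1] := by
          have : (0 + (j : Int)) + 1 = ((j + 1 : Nat) : Int) := by push_cast; ring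
          rw [this, PySem.List.pyGetD_natCast, List.getD_eq_getElem _ _ (by omega)]
        simp only [hgj, hgj1, List.getElem_tail]
        exact congrArg String.ofList (pvPair_eq _ _)
    · rw [PySem.List.pyGetD_neg_one strings "" hne, PySem.List.slice_from_neg_one,
        drop_len_sub_one strings hne]
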